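-- pv_equiv track=rewrite | github.com/PaceGG/Episode-Chooser | episode choose remake/gameTime.py | calc_next_game_time
-- ===== SOURCE A (Python) =====
-- def calc_next_game_time(game_time):
--     extra_time = (game_time - 120)//5
--     if extra_time > 0: is_negative = 1
--     else: is_negative = -1
--
--     base = abs(extra_time) // 3
--     remainder = abs(extra_time) % 3
--
--     output = [base] * 3
--
--     for i in range(remainder):
--         output[i] += 1
--
--     return [x*5*-1*is_negative for x in output if x != 0]
-- ===== SOURCE B (Python) =====
-- def calc_next_game_time(game_time):
--     extra_time = (game_time - 120) // 5
--     sign = -5 if extra_time > 0 else 5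
--
--     def distribute(n, slots):
--         # greedy even split: take the ceiling share for the first slot,
--         # recurse on what is left; stops when nothing remains, so zero
--         # parts never appear and no filtering is needed
--         if slots == 0 or n == 0:
--             return []
--         q = -(-n // slots)  # ceil(n / slots)
--         return [q * sign] + distribute(n - q, slots - 1)
--
--     return distribute(abs(extra_time), 3)
-- ===== Notes on version B (the rewrite author's own statement) =====
-- stated objective: alternative
-- what changed: Replaces A's base/remainder arithmetic plus increment loop plus zero-filter comprehension with a recursive greedy distribution that peels off ceil(n/slots) per slot and stops when nothing remains, so zero buckets never arise and no filter pass exists.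
import Mathlib
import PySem

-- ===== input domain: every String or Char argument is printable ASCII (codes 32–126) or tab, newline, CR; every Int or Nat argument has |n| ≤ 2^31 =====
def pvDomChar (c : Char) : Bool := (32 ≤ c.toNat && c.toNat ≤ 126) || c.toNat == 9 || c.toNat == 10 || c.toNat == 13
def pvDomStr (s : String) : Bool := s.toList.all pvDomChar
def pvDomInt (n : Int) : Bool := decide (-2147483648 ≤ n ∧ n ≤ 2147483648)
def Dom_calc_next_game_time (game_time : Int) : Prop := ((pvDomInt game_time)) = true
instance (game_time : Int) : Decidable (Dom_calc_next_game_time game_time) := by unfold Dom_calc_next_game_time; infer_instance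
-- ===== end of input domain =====

-- B replaces A's base/remainder + increment-loop + zero-filter with a recursive greedy
-- distribution (peel off ceil(n/slots) per slot, stop at 0), so no filter pass exists (objective: alternative).

-- ===== PORT A =====
def calc_next_game_time (game_time : Int) : List Int :=
  let extra_time := PySem.Int.floordiv (game_time - 120) 5
  let is_negative : Int := if extra_time > 0 then 1 else -1
  let base := PySem.Int.floordiv |extra_time| 3
  let remainder := PySem.Int.mod |extra_time| 3
  let output := List.replicate 3 base
  -- for i in range(remainder): output[i] += 1   (i ≥ 0 always, so .toNat is exact here)
  let output := (PySem.List.pyRange 0 remainder 1).foldl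
      (fun o i => o.set i.toNat (o.getD i.toNat 0 + 1)) output
  (output.filter (fun x => x ≠ 0)).map (fun x => x * 5 * (-1) * is_negative)

-- ===== PORT B =====
-- Source B's inner 'distribute(n, slots)': slots counts down from 3, so it is a Nat here
def pvDistribute (sign : Int) : Nat → Int → List Int
  | 0, _ => []
  | s + 1, n =>
    if n = 0 then []
    else
      let q : Int := -(PySem.Int.floordiv (-n) (s + 1))   -- -(-n // slots) = ceil(n/slots)
      q * sign :: pvDistribute sign s (n - q)

def calc_next_game_time_alt (game_time : Int) : List Int :=
  let extra_time := PySem.Int.floordiv (game_time - 120) 5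
  let sign : Int := if extra_time > 0 then -5 else 5
  pvDistribute sign 3 |extra_time|

-- ===== PRECONDITION & SPEC =====
def Spec_calc_next_game_time (game_time : Int) (out : List Int) : Prop := out = calc_next_game_time_alt game_time
instance (game_time : Int) (out : List Int) : Decidable (Spec_calc_next_game_time game_time out) := by unfold Spec_calc_next_game_time; infer_instance

-- ===== CLAIM (what is proved, stated in full; the proofs are below) =====
def Claim_equal_calc_next_game_time : Prop := ∀ (game_time : Int), Dom_calc_next_game_time game_time → Spec_calc_next_game_time game_time (calc_next_game_time game_time)

-- ===== LEMMAS AND PROOFS =====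

-- A's incremented-replicate loop output written as an explicit three-element list, for n ≥ 0.
lemma buckets_eq (n : Int) :
    (PySem.List.pyRange 0 (PySem.Int.mod n 3) 1).foldl
      (fun o i => o.set i.toNat (o.getD i.toNat 0 + 1))
      (List.replicate 3 (PySem.Int.floordiv n 3))
    = [(n + 2) / 3, (n + 1) / 3, n / 3] := by
  have hmul := PySem.Int.floordiv_mul_add_mod n 3
  have hlo := PySem.Int.mod_nonneg n (b := 3) (by norm_num)
  have hhi := PySem.Int.mod_lt n (b := 3) (by norm_num)
  set b := PySem.Int.floordiv n 3 with hb
  set r := PySem.Int.mod n 3 with hr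
  interval_cases r
  · rw [PySem.List.pyRange_one_eq_nil (by norm_num)]
    simp only [List.foldl_nil, show List.replicate 3 b = [b, b, b] from rfl]
    simp only [List.cons.injEq, and_true]
    omega
  · rw [show PySem.List.pyRange 0 1 1 = [0] by decide]
    simp only [List.foldl_cons, List.foldl_nil, show List.replicate 3 b = [b, b, b] from rfl,
      Int.toNat_zero, List.getD_cons_zero, List.set_cons_zero]
    simp only [List.cons.injEq, and_true]
    omega
  · rw [show PySem.List.pyRange 0 2 1 = [0, 1] by decide]
    simp only [List.foldl_cons, List.foldl_nil, show List.replicate 3 b = [b, b, b] from rfl,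
      Int.toNat_zero, Int.toNat_one, List.getD_cons_zero, List.getD_cons_succ,
      List.set_cons_zero, List.set_cons_succ]
    simp only [List.cons.injEq, and_true]
    omega

-- Int.fdiv with a nonneg divisor is Euclidean division (used to evaluate B's ceilings).
lemma pvFdiv (a k : Int) (hk : 0 ≤ k) : a.fdiv k = a / k := by
  have h := Int.fdiv_eq_ediv (a := a) (b := k)
  rw [if_pos (Or.inl hk)] at h; omega

-- B's greedy distribution equals the filtered-and-scaled bucket list, for n ≥ 0.
lemma distribute_eq (s n : Int) (hn : 0 ≤ n) :
    pvDistribute s 3 n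
    = (([(n + 2) / 3, (n + 1) / 3, n / 3]).filter (fun x => x ≠ 0)).map (fun x => x * s) := by
  obtain ⟨b, r, hsplit, hbnn, hr⟩ :
      ∃ b r, n = 3 * b + r ∧ 0 ≤ b ∧ (r = 0 ∨ r = 1 ∨ r = 2) :=
    ⟨n / 3, n % 3, by omega, by omega, by omega⟩
  subst hsplit
  rcases hr with rfl | rfl | rfl
  · -- n = 3b
    by_cases hbz : b = 0
    · subst hbz; norm_num [pvDistribute, List.filter]
    · have v0 : (3 * b + 0 + 2) / 3 = b := by omega
      have v1 : (3 * b + 0 + 1) / 3 = b := by omega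
      have v2 : (3 * b + 0) / 3 = b := by omega
      simp only [pvDistribute, if_neg (show ¬ (3 * b + 0 = 0) by omega), v0, v1, v2]
      rw [show -PySem.Int.floordiv (-(3 * b + 0)) (((2:Nat):Int) + 1) = b by
            simp only [PySem.Int.floordiv]; push_cast; rw [pvFdiv _ _ (by norm_num)]; omega]
      rw [show -PySem.Int.floordiv (-(3 * b + 0 - b)) (((1:Nat):Int) + 1) = b by
            simp only [PySem.Int.floordiv]; push_cast; rw [pvFdiv _ _ (by norm_num)]; omega]
      rw [show -PySem.Int.floordiv (-(3 * b + 0 - b - b)) (((0:Nat):Int) + 1) = b by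
            simp only [PySem.Int.floordiv]; push_cast; rw [pvFdiv _ _ (by norm_num)]; omega]
      rw [if_neg (show ¬ (3 * b + 0 - b = 0) by omega),
          if_neg (show ¬ (3 * b + 0 - b - b = 0) by omega)]
      simp [List.filter, hbz]
  · -- n = 3b + 1
    by_cases hbz : b = 0
    · subst hbz
      norm_num [pvDistribute, PySem.Int.floordiv, List.filter]
      rw [show ((-1:Int).fdiv 3) = -1 by decide]
      norm_num
    · have v0 : (3 * b + 1 + 2) / 3 = b + 1 := by omega
      have v1 : (3 * b + 1 + 1) / 3 = b := by omega
      have v2 : (3 * b + 1) / 3 = b := by omega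
      simp only [pvDistribute, if_neg (show ¬ (3 * b + 1 = 0) by omega), v0, v1, v2]
      rw [show -PySem.Int.floordiv (-(3 * b + 1)) (((2:Nat):Int) + 1) = b + 1 by
            simp only [PySem.Int.floordiv]; push_cast; rw [pvFdiv _ _ (by norm_num)]; omega]
      rw [show -PySem.Int.floordiv (-(3 * b + 1 - (b + 1))) (((1:Nat):Int) + 1) = b by
            simp only [PySem.Int.floordiv]; push_cast; rw [pvFdiv _ _ (by norm_num)]; omega]
      rw [show -PySem.Int.floordiv (-(3 * b + 1 - (b + 1) - b)) (((0:Nat):Int) + 1) = b by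
            simp only [PySem.Int.floordiv]; push_cast; rw [pvFdiv _ _ (by norm_num)]; omega]
      rw [if_neg (show ¬ (3 * b + 1 - (b + 1) = 0) by omega),
          if_neg (show ¬ (3 * b + 1 - (b + 1) - b = 0) by omega)]
      simp [List.filter, hbz, show b + 1 ≠ 0 by omega]
  · -- n = 3b + 2
    by_cases hbz : b = 0
    · subst hbz
      norm_num [pvDistribute, PySem.Int.floordiv, List.filter]
      rw [show ((-2:Int).fdiv 3) = -1 by decide]
      norm_num
      rw [show ((-1:Int).fdiv 2) = -1 by decide]
      norm_num
    · have v0 : (3 * b + 2 + 2) / 3 = b + 1 := by omega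
      have v1 : (3 * b + 2 + 1) / 3 = b + 1 := by omega
      have v2 : (3 * b + 2) / 3 = b := by omega
      simp only [pvDistribute, if_neg (show ¬ (3 * b + 2 = 0) by omega), v0, v1, v2]
      rw [show -PySem.Int.floordiv (-(3 * b + 2)) (((2:Nat):Int) + 1) = b + 1 by
            simp only [PySem.Int.floordiv]; push_cast; rw [pvFdiv _ _ (by norm_num)]; omega]
      rw [show -PySem.Int.floordiv (-(3 * b + 2 - (b + 1))) (((1:Nat):Int) + 1) = b + 1 by
            simp only [PySem.Int.floordiv]; push_cast; rw [pvFdiv _ _ (by norm_num)]; omega]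
      rw [show -PySem.Int.floordiv (-(3 * b + 2 - (b + 1) - (b + 1))) (((0:Nat):Int) + 1) = b by
            simp only [PySem.Int.floordiv]; push_cast; rw [pvFdiv _ _ (by norm_num)]; omega]
      rw [if_neg (show ¬ (3 * b + 2 - (b + 1) = 0) by omega),
          if_neg (show ¬ (3 * b + 2 - (b + 1) - (b + 1) = 0) by omega)]
      simp [List.filter, hbz, show b + 1 ≠ 0 by omega]

-- ===== VERDICT (by name: the statement is the Claim_ definition above) =====
theorem calc_next_game_time_spec : Claim_equal_calc_next_game_time := by
  intro g _
  unfold Spec_calc_next_game_time calc_next_game_time calc_next_game_time_alt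
  simp only
  rw [buckets_eq |PySem.Int.floordiv (g - 120) 5|,
      distribute_eq _ _ (abs_nonneg _)]
  by_cases h : PySem.Int.floordiv (g - 120) 5 > 0 <;>
    simp only [h, if_true, if_false] <;>
    exact List.map_congr_left (fun x _ => by ring)
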